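-- pv_equiv track=rewrite | github.com/DorianoDellAria/BDD_project | code/DataBase.py | key
-- ===== SOURCE A (Python) =====
-- from copy import deepcopy
--
-- def key(sKey:list,chain:str)->list:
--     for i in range(len(sKey)):
--         sKey[i] = sKey[i].replace(chain,'')
--     result = deepcopy(sKey)
--     for _ in range(len(sKey)):
--         copy = deepcopy(result)
--         for i in range(len(sKey)):
--             for j in range(len(sKey)):
--                 if i==j:
--                     continue
--                 if include(sKey[j].split(),sKey[i].split()) and sKey[i] in result and len(sKey[i].split())>len(sKey[j].split()):
--                     result.remove(sKey[i])
--                     i-=1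
--                     break
--         if copy==result:
--             break
--     for i in range(len(result)):
--         result[i] = result[i] + chain
--     return result
--
-- def include(a:list,b:list)->bool:
--     for i in a:
--         if i not in b:
--             return False
--     return True
-- ===== SOURCE B (Python) =====
-- def key(sKey: list, chain: str) -> list:
--     # strip chain in place, same mutation as the original
--     for i in range(len(sKey)):
--         sKey[i] = sKey[i].replace(chain, '')
--     # indexed table: (stripped string, word set, raw word count)
--     table = [(s, frozenset(s.split()), len(s.split())) for s in sKey]
--     by_count = sorted(table, key=lambda t: t[2])
--     out = []
--     for s, words, c in table:
--         kept = True
--         for _, ws, cs in by_count: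
--             if cs >= c:
--                 break
--             if ws <= words:
--                 kept = False
--                 break
--         if kept:
--             out.append(s + chain)
--     return out
-- ===== Notes on version B (the rewrite author's own statement) =====
-- stated objective: alternative
-- what changed: Replaces A's fixed-point loop of repeated nested scans with in-place list.remove by a single pass: build an indexed (string, word-set, word-count) table once, sort it by word count ascending, and keep each element unless the strictly-smaller-count prefix of the sorted table contains a word-subset of it; kept elements are emitted in original order, never removed.
import Mathlib
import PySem

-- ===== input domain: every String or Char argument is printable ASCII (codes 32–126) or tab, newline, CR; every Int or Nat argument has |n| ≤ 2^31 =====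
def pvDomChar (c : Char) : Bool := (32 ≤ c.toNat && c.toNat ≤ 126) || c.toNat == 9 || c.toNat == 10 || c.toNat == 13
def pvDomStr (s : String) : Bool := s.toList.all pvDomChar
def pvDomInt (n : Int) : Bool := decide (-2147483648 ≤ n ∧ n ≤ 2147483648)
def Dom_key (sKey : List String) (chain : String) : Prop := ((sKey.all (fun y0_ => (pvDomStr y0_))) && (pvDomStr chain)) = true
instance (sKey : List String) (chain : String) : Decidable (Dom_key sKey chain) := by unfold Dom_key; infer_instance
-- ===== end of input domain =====

-- B replaces A's fixed-point loop of repeated nested containment scans with list.remove by a single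
-- pass over a count-sorted table of word sets (same strip-in-place mutation of sKey in Python; the
-- equivalence proved here is about the return value).


-- ===== PORT A =====
-- include(a, b): for i in a: if i not in b: return False; return True
def pyInclude : List String → List String → Bool
  | [], _ => true
  | i :: rest, b => if b.contains i then pyInclude rest b else false

-- inner 'for j in range(len(sKey))' at a fixed i, over the (index, value) pairs of the stripped sKey:
-- on the first trigger remove sKey[i] from result and break.  'sKey[i] in result' is part of the
-- trigger, so remove? always succeeds when taken (getD only totalises).
def keyJLoop (i : Int) (si : String) : List (Int × String) → List String → List String
  | [], result => result
  | (j, sj) :: rest, result =>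
    if j == i then keyJLoop i si rest result
    else if pyInclude (PySem.Str.split₀ sj) (PySem.Str.split₀ si) && result.contains si
            && decide ((PySem.Str.split₀ si).length > (PySem.Str.split₀ sj).length) then
      (PySem.List.remove? result si).getD result
    else keyJLoop i si rest result

-- 'for i in range(len(sKey))' of one pass
def keyILoop (allPairs : List (Int × String)) : List (Int × String) → List String → List String
  | [], result => result
  | (i, si) :: rest, result => keyILoop allPairs rest (keyJLoop i si allPairs result)

-- 'for _ in range(len(sKey))' with the 'if copy == result: break' test after each pass
def keyOuter (stripped : List String) : Nat → List String → List String
  | 0, result => result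
  | fuel + 1, result =>
    let r' := keyILoop (PySem.List.enumerate stripped 0) (PySem.List.enumerate stripped 0) result
    if result == r' then r' else keyOuter stripped fuel r'

def key (sKey : List String) (chain : String) : List String :=
  let stripped := sKey.map (fun s => PySem.Str.replace s chain "")
  let result := keyOuter stripped stripped.length stripped
  result.map (fun r => r ++ chain)

-- ===== PORT B =====
-- scan of the count-sorted table: break (kept) once counts reach c, drop on a word-subset
def scanKept (words : PySem.Set String) (c : Int) : List (String × PySem.Set String × Int) → Bool
  | [] => true
  | (_, ws, cs) :: rest =>
    if cs ≥ c then true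
    else if PySem.Set.issubset ws words then false
    else scanKept words c rest

def keyAltCore (stripped : List String) (chain : String) : List String :=
  let table := stripped.map
    (fun s => (s, PySem.Set.ofList (PySem.Str.split₀ s), ((PySem.Str.split₀ s).length : Int)))
  let byCount := PySem.List.sorted table (fun t => t.2.2) false
  table.foldl (fun out t => if scanKept t.2.1 t.2.2 byCount then out ++ [t.1 ++ chain] else out) []

def key_alt (sKey : List String) (chain : String) : List String :=
  keyAltCore (sKey.map (fun s => PySem.Str.replace s chain "")) chain

-- ===== PRECONDITION & SPEC =====
def Spec_key (sKey : List String) (chain : String) (out : List String) : Prop := out = key_alt sKey chain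
instance (sKey : List String) (chain : String) (out : List String) : Decidable (Spec_key sKey chain out) := by unfold Spec_key; infer_instance

-- ===== CLAIM (what is proved, stated in full; the proofs are below) =====
def Claim_equal_key : Prop := ∀ (sKey : List String) (chain : String), Dom_key sKey chain → Spec_key sKey chain (key sKey chain)

-- ===== LEMMAS AND PROOFS =====

-- word count of a stripped string
def wc (s : String) : Nat := (PySem.Str.split₀ s).length

def domB (stripped : List String) (s : String) : Bool :=
  stripped.any (fun t => pyInclude (PySem.Str.split₀ t) (PySem.Str.split₀ s) && decide (wc t < wc s))

def keepB (stripped : List String) (s : String) : Bool := !domB stripped s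

lemma pyInclude_eq_true_iff (a b : List String) : pyInclude a b = true ↔ ∀ x ∈ a, x ∈ b := by
  induction a with
  | nil => simp [pyInclude]
  | cons i rest ih =>
    simp only [pyInclude, List.mem_cons]
    by_cases h : b.contains i = true
    · rw [if_pos h, ih]
      constructor
      · rintro hall x (rfl | hx)
        · exact List.contains_iff_mem.mp h
        · exact hall x hx
      · intro hall x hx; exact hall x (Or.inr hx)
    · rw [if_neg h]
      constructor
      · intro hf; exact absurd hf Bool.false_ne_true
      · intro hall; exact absurd (List.contains_iff_mem.mpr (hall i (Or.inl rfl))) h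

lemma remove?_append_not_mem (l1 l2 : List String) (a : String) (h : a ∉ l1) :
    PySem.List.remove? (l1 ++ a :: l2) a = some (l1 ++ l2) := by
  induction l1 with
  | nil => simp [PySem.List.remove?_cons_self]
  | cons x rest ih =>
    have hx : x ≠ a := fun he => h (he ▸ List.mem_cons_self)
    have hr : a ∉ rest := fun hm => h (List.mem_cons_of_mem _ hm)
    rw [List.cons_append, PySem.List.remove?_cons_of_ne _ hx, ih hr, Option.map_some, List.cons_append]

lemma keyJLoop_no_contains (i : Int) (si : String) (l : List (Int × String)) (result : List String)
    (hc : result.contains si = false) : keyJLoop i si l result = result := by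
  induction l with
  | nil => rfl
  | cons p rest ih =>
    obtain ⟨j, sj⟩ := p
    simp only [keyJLoop, hc, Bool.and_false, Bool.false_and]
    split
    · exact ih
    · exact ih

lemma keyJLoop_char (i : Int) (si : String) (l : List (Int × String)) (result : List String)
    (hc : result.contains si = true) :
    keyJLoop i si l result =
      if l.any (fun p => (p.1 != i) && pyInclude (PySem.Str.split₀ p.2) (PySem.Str.split₀ si)
          && decide ((PySem.Str.split₀ si).length > (PySem.Str.split₀ p.2).length))
      then (PySem.List.remove? result si).getD result else result := by
  induction l with
  | nil => rfl
  | cons p rest ih =>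
    obtain ⟨j, sj⟩ := p
    by_cases hj : j = i
    · subst hj
      simp only [keyJLoop, beq_self_eq_true, if_true, List.any_cons, bne_self_eq_false,
        Bool.false_and, Bool.false_or]
      exact ih
    · have hbeq : (j == i) = false := beq_eq_false_iff_ne.mpr hj
      have hbne : (j != i) = true := by simp [bne, hbeq]
      simp only [keyJLoop, hbeq, Bool.false_eq_true, if_false, hc, Bool.and_true,
        List.any_cons, hbne, Bool.true_and]
      by_cases htrig : (pyInclude (PySem.Str.split₀ sj) (PySem.Str.split₀ si)
          && decide ((PySem.Str.split₀ si).length > (PySem.Str.split₀ sj).length)) = true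
      · rw [Bool.and_eq_true] at htrig
        rw [if_pos (by rw [htrig.1, htrig.2]; rfl), if_pos (by rw [htrig.1, htrig.2]; rfl)]
      · rw [Bool.and_eq_true, not_and] at htrig
        have hcase : (pyInclude (PySem.Str.split₀ sj) (PySem.Str.split₀ si) &&
            decide ((PySem.Str.split₀ si).length > (PySem.Str.split₀ sj).length)) = false := by
          cases h1 : pyInclude (PySem.Str.split₀ sj) (PySem.Str.split₀ si) with
          | false => rfl
          | true => simp [htrig h1]
        rw [if_neg (by rw [show (pyInclude (PySem.Str.split₀ sj) (PySem.Str.split₀ si) &&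
            decide ((PySem.Str.split₀ si).length > (PySem.Str.split₀ sj).length)) = false from hcase]; simp), ih,
          hcase, Bool.false_or]

lemma enum_any_eq (xs : List String) (st : Int) (i : Int) (P : String → Bool)
    (hP : ∀ (k : Nat), (h : k < xs.length) → st + k = i → P xs[k] = false) :
    (PySem.List.enumerate xs st).any (fun p => (p.1 != i) && P p.2) = xs.any P := by
  induction xs generalizing st with
  | nil => simp [PySem.List.enumerate_nil]
  | cons x rest ih =>
    rw [PySem.List.enumerate_cons]
    simp only [List.any_cons]
    rw [ih (st + 1) (fun k h he => by
      have := hP (k + 1) (by simpa using Nat.succ_lt_succ h) (by push_cast at he ⊢; omega)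
      simpa using this)]
    by_cases hi : st = i
    · have h0 : P x = false := by
        have := hP 0 (by simp) (by omega)
        simpa using this
      simp [hi, h0]
    · have : (st != i) = true := by simp [bne, beq_eq_false_iff_ne.mpr hi]
      simp [this]

lemma jloop_any_eq_domB (stripped : List String) (i : Nat) (hi : i < stripped.length) :
    ((PySem.List.enumerate stripped 0).any (fun p => (p.1 != (i : Int))
        && pyInclude (PySem.Str.split₀ p.2) (PySem.Str.split₀ stripped[i])
        && decide ((PySem.Str.split₀ stripped[i]).length > (PySem.Str.split₀ p.2).length)))
      = domB stripped stripped[i] := by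
  have h := enum_any_eq stripped 0 (i : Int)
    (fun t => pyInclude (PySem.Str.split₀ t) (PySem.Str.split₀ stripped[i])
        && decide (wc t < wc stripped[i]))
    (fun k h he => by
      have hk : k = i := by omega
      subst hk; simp [wc])
  rw [domB, ← h]
  congr 1
  funext p
  simp only [wc, Bool.and_assoc, gt_iff_lt]
  rfl

lemma keyILoop_inv (stripped : List String) (pre suf : List String) (h : pre ++ suf = stripped) :
    keyILoop (PySem.List.enumerate stripped 0) (PySem.List.enumerate suf (pre.length : Int))
        (pre.filter (keepB stripped) ++ suf)
      = stripped.filter (keepB stripped) := by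
  induction suf generalizing pre with
  | nil =>
    rw [PySem.List.enumerate_nil]
    simp only [keyILoop, List.append_nil]
    rw [← h, List.append_nil]
  | cons s rest ih =>
    rw [PySem.List.enumerate_cons]
    simp only [keyILoop]
    have hlen : (pre.length : Nat) < stripped.length := by
      rw [← h]; simp
    have hs : stripped[pre.length]'hlen = s := by
      rw [List.getElem_of_eq h.symm hlen, List.getElem_append_right (le_refl pre.length)]
      simp
    have hc : (pre.filter (keepB stripped) ++ s :: rest).contains s = true := by
      simp
    rw [keyJLoop_char _ _ _ _ hc]
    have hany := jloop_any_eq_domB stripped pre.length hlen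
    rw [hs] at hany
    rw [hany]
    by_cases hd : domB stripped s = true
    · have hnk : keepB stripped s = false := by simp [keepB, hd]
      have hnm : s ∉ pre.filter (keepB stripped) := by
        intro hm
        have := List.of_mem_filter hm
        rw [hnk] at this; exact Bool.false_ne_true this
      rw [hd, if_pos rfl, remove?_append_not_mem _ _ _ hnm, Option.getD_some]
      have := ih (pre ++ [s]) (by simpa using h)
      simpa [List.filter_append, hnk] using this
    · rw [Bool.not_eq_true] at hd
      have hk : keepB stripped s = true := by simp [keepB, hd]
      rw [hd, if_neg Bool.false_ne_true]
      have := ih (pre ++ [s]) (by simpa using h)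
      simp only [List.filter_append, List.filter_cons, hk, if_pos trivial, List.length_append,
        List.filter_nil] at this
      simpa using this

lemma keyILoop_fix (stripped : List String) (pre suf : List String) (h : pre ++ suf = stripped) :
    keyILoop (PySem.List.enumerate stripped 0) (PySem.List.enumerate suf (pre.length : Int))
        (stripped.filter (keepB stripped))
      = stripped.filter (keepB stripped) := by
  induction suf generalizing pre with
  | nil => rw [PySem.List.enumerate_nil]; rfl
  | cons s rest ih =>
    rw [PySem.List.enumerate_cons]
    simp only [keyILoop]
    have hlen : (pre.length : Nat) < stripped.length := by
      rw [← h]; simp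
    have hs : stripped[pre.length]'hlen = s := by
      rw [List.getElem_of_eq h.symm hlen, List.getElem_append_right (le_refl pre.length)]
      simp
    have step : keyJLoop (pre.length : Int) s (PySem.List.enumerate stripped 0)
        (stripped.filter (keepB stripped)) = stripped.filter (keepB stripped) := by
      by_cases hd : domB stripped s = true
      · have hnm : s ∉ stripped.filter (keepB stripped) := by
          intro hm
          have := List.of_mem_filter hm
          simp [keepB, hd] at this
        apply keyJLoop_no_contains
        simpa using hnm
      · by_cases hcm : (stripped.filter (keepB stripped)).contains s = true
        · rw [keyJLoop_char _ _ _ _ hcm]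
          have hany := jloop_any_eq_domB stripped pre.length hlen
          rw [hs] at hany
          rw [hany]
          rw [Bool.not_eq_true] at hd
          rw [hd, if_neg Bool.false_ne_true]
        · apply keyJLoop_no_contains
          simpa using hcm
    rw [step]
    have := ih (pre ++ [s]) (by simpa using h)
    simpa using this

lemma keyOuter_eq_filter (stripped : List String) :
    keyOuter stripped stripped.length stripped = stripped.filter (keepB stripped) := by
  have hpass : keyILoop (PySem.List.enumerate stripped 0) (PySem.List.enumerate stripped 0) stripped
      = stripped.filter (keepB stripped) := by
    have := keyILoop_inv stripped [] stripped (by simp)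
    simpa using this
  have hfix : keyILoop (PySem.List.enumerate stripped 0) (PySem.List.enumerate stripped 0)
      (stripped.filter (keepB stripped)) = stripped.filter (keepB stripped) := by
    have := keyILoop_fix stripped [] stripped (by simp)
    simpa using this
  cases hn : stripped.length with
  | zero =>
    have he : stripped = [] := List.length_eq_zero_iff.mp hn
    subst he; rfl
  | succ m =>
    cases m with
    | zero =>
      obtain ⟨s, he⟩ := List.length_eq_one_iff.mp hn
      subst he
      show keyOuter [s] 1 [s] = _
      simp only [keyOuter, hpass]
      have hk : keepB [s] s = true := by simp [keepB, domB]
      simp [hk]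
    | succ fuel =>
      simp only [keyOuter, hpass]
      by_cases he : stripped == stripped.filter (keepB stripped)
      · rw [if_pos he]
      · rw [if_neg he]
        simp only [hfix, beq_self_eq_true, if_true]

lemma any_perm {α : Type} {l₁ l₂ : List α} (p : α → Bool) (h : l₁.Perm l₂) :
    l₁.any p = l₂.any p := by
  cases hb : l₂.any p with
  | true =>
    obtain ⟨x, hx, hp⟩ := List.any_eq_true.mp hb
    exact List.any_eq_true.mpr ⟨x, h.mem_iff.mpr hx, hp⟩
  | false =>
    rw [List.any_eq_false] at hb ⊢
    exact fun x hx => hb x (h.mem_iff.mp hx)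

lemma scanKept_char (words : PySem.Set String) (c : Int)
    (l : List (String × PySem.Set String × Int))
    (hs : l.Pairwise (fun a b => a.2.2 ≤ b.2.2)) :
    scanKept words c l = !(l.any (fun t => decide (t.2.2 < c) && PySem.Set.issubset t.2.1 words)) := by
  induction l with
  | nil => rfl
  | cons t rest ih =>
    obtain ⟨s', ws, cs⟩ := t
    obtain ⟨hhead, hrest⟩ := List.pairwise_cons.mp hs
    by_cases hge : cs ≥ c
    · have hanyrest : rest.any (fun t => decide (t.2.2 < c) && PySem.Set.issubset t.2.1 words) = false := by
        rw [List.any_eq_false]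
        intro x hx
        have hle : c ≤ x.2.2 := le_trans hge (hhead x hx)
        simp [not_lt.mpr hle]
      simp [scanKept, hge, hanyrest, not_lt.mpr hge]
    · rw [not_le] at hge
      by_cases hsub : PySem.Set.issubset ws words = true
      · simp [scanKept, not_le.mpr hge, hsub, hge]
      · rw [Bool.not_eq_true] at hsub
        simp only [scanKept, if_neg (not_le.mpr hge), hsub, Bool.false_eq_true, if_false]
        rw [ih hrest]
        simp [List.any_cons, hge, hsub]

lemma issubset_ofList_eq_pyInclude (a b : List String) :
    PySem.Set.issubset (PySem.Set.ofList a) (PySem.Set.ofList b) = pyInclude a b := by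
  cases hp : pyInclude a b with
  | true =>
    rw [(PySem.Set.issubset_iff _ _)]
    intro x hx
    have hxa : x ∈ a := (PySem.Set.mem_ofList _ _).mp hx
    exact (PySem.Set.mem_ofList _ _).mpr ((pyInclude_eq_true_iff a b).mp hp x hxa)
  | false =>
    rw [← Bool.not_eq_true]
    intro hsub
    rw [← Bool.not_eq_true] at hp
    apply hp
    rw [pyInclude_eq_true_iff]
    intro x hx
    exact (PySem.Set.mem_ofList _ _).mp
      ((PySem.Set.issubset_iff _ _).mp hsub x ((PySem.Set.mem_ofList _ _).mpr hx))

lemma keyAltCore_eq_filter (stripped : List String) (chain : String) :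
    keyAltCore stripped chain = (stripped.filter (keepB stripped)).map (fun r => r ++ chain) := by
  show (stripped.map
      (fun s => (s, PySem.Set.ofList (PySem.Str.split₀ s), ((PySem.Str.split₀ s).length : Int)))).foldl
      (fun out t => if scanKept t.2.1 t.2.2 (PySem.List.sorted (stripped.map
        (fun s => (s, PySem.Set.ofList (PySem.Str.split₀ s), ((PySem.Str.split₀ s).length : Int))))
        (fun t => t.2.2) false) then out ++ [t.1 ++ chain] else out) [] = _
  rw [PySem.List.foldl_append_if]
  rw [List.nil_append, List.filter_map, List.map_map]
  congr 1
  · apply List.filter_congr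
    intro s _
    show scanKept (PySem.Set.ofList (PySem.Str.split₀ s)) ((PySem.Str.split₀ s).length : Int) _ = keepB stripped s
    rw [scanKept_char _ _ _ (PySem.List.sorted_pairwise _ _)]
    rw [any_perm _ (PySem.List.sorted_perm _ _ _), List.any_map]
    rw [keepB]
    congr 1
    rw [domB]
    apply List.any_congr rfl
    intro t
    show (decide (((PySem.Str.split₀ t).length : Int) < ((PySem.Str.split₀ s).length : Int))
        && PySem.Set.issubset (PySem.Set.ofList (PySem.Str.split₀ t)) (PySem.Set.ofList (PySem.Str.split₀ s)))
      = (pyInclude (PySem.Str.split₀ t) (PySem.Str.split₀ s) && decide (wc t < wc s))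
    rw [issubset_ofList_eq_pyInclude, Bool.and_comm]
    congr 1
    simp [wc]

-- ===== VERDICT (by name: the statement is the Claim_ definition above) =====
theorem key_spec : Claim_equal_key := by
  intro sKey chain _
  show key sKey chain = key_alt sKey chain
  show (keyOuter (sKey.map (fun s => PySem.Str.replace s chain ""))
      (sKey.map (fun s => PySem.Str.replace s chain "")).length
      (sKey.map (fun s => PySem.Str.replace s chain ""))).map (fun r => r ++ chain)
    = keyAltCore (sKey.map (fun s => PySem.Str.replace s chain "")) chain
  rw [keyOuter_eq_filter, keyAltCore_eq_filter]
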